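-- pv_equiv track=rewrite | github.com/rajeshkr2016/utils | py2notebook.py | _trim_blank_lines
-- ===== SOURCE A (Python) =====
-- def _trim_blank_lines(lines: list[str]) -> list[str]:
--     """Strip leading and trailing blank lines, collapse 3+ consecutive blanks to 2."""
--     # Strip leading blank lines
--     while lines and lines[0].strip() == "":
--         lines = lines[1:]
--     # Strip trailing blank lines
--     while lines and lines[-1].strip() == "":
--         lines = lines[:-1]
--     # Collapse runs of 3+ blank lines down to 2 (one visual gap)
--     result = []
--     blank_count = 0
--     for line in lines:
--         if line.strip() == "":
--             blank_count += 1
--             if blank_count <= 2: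
--                 result.append(line)
--         else:
--             blank_count = 0
--             result.append(line)
--     return result
-- ===== SOURCE B (Python) =====
-- def _trim_blank_lines(lines: list[str]) -> list[str]:
--     """Single pass: buffer each blank run; emit at most 2 blanks per interior
--     run, drop the leading and trailing runs entirely."""
--     out = []
--     pending = []      # blank lines of the current run, in order
--     started = False   # whether a non-blank line has been seen yet
--     for line in lines:
--         if line.strip() == "":
--             pending.append(line)
--         else:
--             if started:
--                 out.extend(pending[:2])
--             pending = []
--             started = True
--             out.append(line)
--     return out
-- ===== Notes on version B (the rewrite author's own statement) =====
-- stated objective: alternative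
-- what changed: Replaced A's two while-loops that repeatedly reslice the list plus a separate collapse pass with a single pass that buffers each blank run and emits at most two blanks per interior run, dropping leading/trailing runs.
import Mathlib
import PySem

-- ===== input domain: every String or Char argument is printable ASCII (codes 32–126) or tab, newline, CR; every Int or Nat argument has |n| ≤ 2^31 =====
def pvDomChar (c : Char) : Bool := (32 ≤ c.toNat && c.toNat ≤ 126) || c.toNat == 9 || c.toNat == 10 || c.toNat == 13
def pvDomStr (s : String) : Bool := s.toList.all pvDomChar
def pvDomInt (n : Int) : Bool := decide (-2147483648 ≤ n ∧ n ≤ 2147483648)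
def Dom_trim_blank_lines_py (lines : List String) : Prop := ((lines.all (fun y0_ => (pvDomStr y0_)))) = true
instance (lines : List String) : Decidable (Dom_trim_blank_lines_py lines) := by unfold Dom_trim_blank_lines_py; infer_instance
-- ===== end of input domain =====

-- B replaces A's two trimming while-loops plus a separate collapse pass with one single
-- pass that buffers each blank run; return values proved equal on all inputs.

-- ===== PORT A =====
-- while lines and lines[0].strip() == "": lines = lines[1:]
def pvAStripLead : List String → List String
  | [] => []
  | l :: ls => if PySem.Str.strip l = "" then pvAStripLead ls else l :: ls

-- while lines and lines[-1].strip() == "": lines = lines[:-1]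
def pvAStripTrail (lines : List String) : List String :=
  match hl : lines.getLast? with
  | some l => if PySem.Str.strip l = "" then pvAStripTrail lines.dropLast else lines
  | none => []
termination_by lines.length
decreasing_by
  have hne : lines ≠ [] := by rintro rfl; simp at hl
  have := List.length_pos_of_ne_nil hne
  simp [List.length_dropLast]; omega

-- for-loop body: state = (result, blank_count)
def pvStepA (st : List String × Nat) (line : String) : List String × Nat :=
  if PySem.Str.strip line = "" then
    let bc := st.2 + 1
    (if bc ≤ 2 then st.1 ++ [line] else st.1, bc)
  else (st.1 ++ [line], 0)

def trim_blank_lines_py (lines : List String) : List String :=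
  ((pvAStripTrail (pvAStripLead lines)).foldl pvStepA ([], 0)).1

-- ===== PORT B =====
-- loop body: state = (out, pending, started)
def pvStepB (st : List String × List String × Bool) (line : String) :
    List String × List String × Bool :=
  if PySem.Str.strip line = "" then (st.1, st.2.1 ++ [line], st.2.2)
  else ((if st.2.2 then st.1 ++ st.2.1.take 2 else st.1) ++ [line], [], true)

def trim_blank_lines_py_alt (lines : List String) : List String :=
  (lines.foldl pvStepB ([], [], false)).1

-- ===== PRECONDITION & SPEC =====
def Spec_trim_blank_lines_py (lines : List String) (out : List String) : Prop := out = trim_blank_lines_py_alt lines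
instance (lines : List String) (out : List String) : Decidable (Spec_trim_blank_lines_py lines out) := by unfold Spec_trim_blank_lines_py; infer_instance

-- ===== CLAIM (what is proved, stated in full; the proofs are below) =====
def Claim_equal_trim_blank_lines_py : Prop := ∀ (lines : List String), Dom_trim_blank_lines_py lines → Spec_trim_blank_lines_py lines (trim_blank_lines_py lines)

-- ===== LEMMAS AND PROOFS =====

-- B's fold ignores leading blank lines (pending is discarded at the first non-blank line)
lemma pvB_lead (lines : List String) (p : List String) :
    (lines.foldl pvStepB ([], p, false)).1
      = ((pvAStripLead lines).foldl pvStepB ([], [], false)).1 := by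
  induction lines generalizing p with
  | nil => simp [pvAStripLead]
  | cons l ls ih =>
    by_cases hb : PySem.Str.strip l = ""
    · simp only [pvAStripLead, List.foldl_cons, pvStepB, hb, if_pos]
      exact ih (p ++ [l])
    · simp [pvAStripLead, hb, pvStepB]

-- B's fold .1 is unchanged by stripping trailing blanks
lemma pvB_trail (lines : List String) (s : List String × List String × Bool) :
    ((pvAStripTrail lines).foldl pvStepB s).1 = (lines.foldl pvStepB s).1 := by
  fun_induction pvAStripTrail lines with
  | case1 lines l hl hb ih =>
    rw [ih]
    have hne : lines ≠ [] := by rintro rfl; simp at hl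
    conv_rhs => rw [← List.dropLast_append_getLast hne]
    have hx : lines.getLast hne = l := by
      have := List.getLast?_eq_some_getLast (l := lines) (h := hne)
      rw [this] at hl; exact Option.some.inj hl
    rw [List.foldl_append]
    simp [pvStepB, hx, hb]
  | case2 lines l hl hb => rfl
  | case3 lines hl => rw [List.getLast?_eq_none_iff.mp hl]

-- after processing a list whose last line is non-blank, pending is empty
lemma pvB_pending_nil (N : List String) (s : List String × List String × Bool)
    (x : String) (hx : N.getLast? = some x) (hl : ¬ PySem.Str.strip x = "") :
    (N.foldl pvStepB s).2.1 = [] := by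
  have hne : N ≠ [] := by rintro rfl; simp at hx
  have hxx : N.getLast hne = x := by
    have := List.getLast?_eq_some_getLast (l := N) (h := hne)
    rw [this] at hx; exact Option.some.inj hx
  conv_lhs => rw [← List.dropLast_append_getLast hne]
  rw [List.foldl_append]
  simp [pvStepB, hxx, hl]

-- the head of pvAStripLead's result is non-blank
lemma pvLead_head (lines : List String) (h : String) (t : List String)
    (he : pvAStripLead lines = h :: t) : ¬ PySem.Str.strip h = "" := by
  induction lines with
  | nil => simp [pvAStripLead] at he
  | cons l ls ih =>
    by_cases hb : PySem.Str.strip l = ""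
    · exact ih (by simpa [pvAStripLead, hb] using he)
    · simp only [pvAStripLead, if_neg hb] at he
      cases he; exact hb

-- pvAStripTrail preserves the head (as head?)
lemma pvTrail_head (lines : List String) (h : String) (t : List String)
    (he : pvAStripTrail lines = h :: t) : lines.head? = some h := by
  fun_induction pvAStripTrail lines with
  | case1 lines l hl hb ih =>
    have ih' := ih he
    have hne : lines ≠ [] := by rintro rfl; simp at hl
    conv_lhs => rw [← List.dropLast_append_getLast hne]
    cases hdl : lines.dropLast with
    | nil => rw [hdl] at ih'; simp at ih'
    | cons a b => rw [hdl] at ih'; simp at ih' ⊢; simpa using ih'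
  | case2 lines l hl hb => rw [he]; rfl
  | case3 lines hl => simp at he
-- the last line of pvAStripTrail's result is non-blank
lemma pvTrail_last (lines : List String) (x : String)
    (hx : (pvAStripTrail lines).getLast? = some x) : ¬ PySem.Str.strip x = "" := by
  fun_induction pvAStripTrail lines with
  | case1 lines l hl hb ih => exact ih hx
  | case2 lines l hl hb =>
    rw [hl] at hx
    cases Option.some.inj hx; exact hb
  | case3 lines hl => simp at hx

-- main invariant: A's state (out ++ pending.take 2, pending.length) tracks B's (out, pending, true)
lemma pvInv (rest : List String) : ∀ (out pending : List String),
    (rest.foldl pvStepA (out ++ pending.take 2, pending.length)).1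
      = (rest.foldl pvStepB (out, pending, true)).1
        ++ (rest.foldl pvStepB (out, pending, true)).2.1.take 2 := by
  induction rest with
  | nil => intro out pending; rfl
  | cons l ls ih =>
    intro out pending
    by_cases hb : PySem.Str.strip l = ""
    · have hstepB : pvStepB (out, pending, true) l = (out, pending ++ [l], true) := by
        simp [pvStepB, hb]
      have hstepA : pvStepA (out ++ pending.take 2, pending.length) l
          = (out ++ (pending ++ [l]).take 2, (pending ++ [l]).length) := by
        simp only [pvStepA, if_pos hb, List.length_append, List.length_cons,
          List.length_nil]
        by_cases h2 : pending.length + 1 ≤ 2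
        · have : (pending ++ [l]).take 2 = pending ++ [l] := by
            apply List.take_of_length_le; simp; omega
          have hp : pending.take 2 = pending := by
            apply List.take_of_length_le; omega
          simp [h2, this, hp]
        · have hlen : 2 ≤ pending.length := by omega
          have : (pending ++ [l]).take 2 = pending.take 2 :=
            List.take_append_of_le_length hlen
          simp [h2, this]
      simp only [List.foldl_cons, hstepA, hstepB]
      exact ih out (pending ++ [l])
    · have hstepB : pvStepB (out, pending, true) l
          = (out ++ pending.take 2 ++ [l], [], true) := by
        simp [pvStepB, hb]
      have hstepA : pvStepA (out ++ pending.take 2, pending.length) l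
          = ((out ++ pending.take 2 ++ [l]) ++ ([] : List String).take 2,
             ([] : List String).length) := by
        simp [pvStepA, hb]
      simp only [List.foldl_cons, hstepA, hstepB]
      exact ih (out ++ pending.take 2 ++ [l]) []

-- ===== VERDICT (by name: the statement is the Claim_ definition above) =====
theorem trim_blank_lines_py_spec : Claim_equal_trim_blank_lines_py := by
  intro lines _
  unfold Spec_trim_blank_lines_py trim_blank_lines_py trim_blank_lines_py_alt
  rw [pvB_lead lines [], ← pvB_trail (pvAStripLead lines)]
  cases hL2 : pvAStripTrail (pvAStripLead lines) with
  | nil => rfl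
  | cons l rest =>
    have hhead : (pvAStripLead lines).head? = some l := pvTrail_head _ _ _ hL2
    have hlb : ¬ PySem.Str.strip l = "" := by
      cases hLd : pvAStripLead lines with
      | nil => rw [hLd] at hhead; simp at hhead
      | cons a b =>
        rw [hLd] at hhead; simp at hhead
        subst hhead
        exact pvLead_head lines a b hLd
    have hx : (l :: rest).getLast? = some ((l :: rest).getLast (by simp)) :=
      List.getLast?_eq_some_getLast (by simp)
    have hxb : ¬ PySem.Str.strip ((l :: rest).getLast (by simp)) = "" := by
      apply pvTrail_last (pvAStripLead lines)
      rw [hL2]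
      exact hx
    have hpend : ((l :: rest).foldl pvStepB (([] : List String), ([] : List String), false)).2.1 = [] :=
      pvB_pending_nil _ _ _ hx hxb
    have hstepA : pvStepA ([], 0) l = (([l] : List String), 0) := by
      simp [pvStepA, hlb]
    have hstepB : pvStepB ([], [], false) l = (([l] : List String), ([] : List String), true) := by
      simp [pvStepB, hlb]
    rw [List.foldl_cons, List.foldl_cons, hstepA, hstepB]
    rw [List.foldl_cons, hstepB] at hpend
    have hinv := pvInv rest [l] []
    simp only [List.take_nil, List.append_nil, List.length_nil] at hinv
    rw [hinv, hpend]
    simp
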